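-- pv_equiv track=rewrite | github.com/yystats/leetcode | _227_basic_calculator.py | calculator2
-- ===== SOURCE A (Python) =====
-- def calculator2(expression):
--     expression = expression.replace(" ", "")
--     total = 0
--     for add_term in expression.split('+'):
--         product = 1
--         for prod_term in add_term.split('*'):
--             product *= int(prod_term)
--         total += product
--     return total
-- ===== SOURCE B (Python) =====
-- def calculator2(expression):
--     s = expression.replace(" ", "")
--     stack = []
--     num = ""
--     op = '+'
--     for ch in s + "+":
--         if ch == '+' or ch == '*':
--             if op == '+':
--                 stack.append(int(num))
--             else:
--                 stack[-1] *= int(num)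
--             num = ""
--             op = ch
--         else:
--             num = num + ch
--     return sum(stack)
-- ===== Notes on version B (the rewrite author's own statement) =====
-- stated objective: alternative
-- what changed: Replaced A's nested split('+')/split('*') passes and per-term product accumulation by a single left-to-right scan that tokenizes on the fly and maintains a stack of additive terms ('*' multiplies into the stack top, '+' pushes), summed at the end.
import Mathlib
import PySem

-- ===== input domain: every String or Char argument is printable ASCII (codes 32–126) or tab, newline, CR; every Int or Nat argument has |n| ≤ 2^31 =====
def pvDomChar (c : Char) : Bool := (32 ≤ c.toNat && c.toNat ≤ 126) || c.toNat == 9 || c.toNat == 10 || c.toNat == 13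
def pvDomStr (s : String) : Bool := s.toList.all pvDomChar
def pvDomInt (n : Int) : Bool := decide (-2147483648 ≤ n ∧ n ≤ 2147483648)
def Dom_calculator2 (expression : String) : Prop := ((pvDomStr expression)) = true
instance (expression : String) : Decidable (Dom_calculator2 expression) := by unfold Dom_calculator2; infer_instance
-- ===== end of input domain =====

-- B replaces A's nested split('+')/split('*') passes by a single left-to-right scan with a stack
-- of additive terms ('*' folds into the stack top), summed at the end: an alternative one-pass
-- algorithm of the same cost.


-- ===== PORT A =====
-- 'split(sep)' with the nonempty separators "+" / "*" always succeeds, so split? is always some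
-- and '.getD []' is never the default; 'int(tok)' is ofStr?, none = ValueError — those inputs are
-- excluded by Pre_calculator2, so '.getD 0' is never the default on admitted inputs.
def calculator2 (expression : String) : Int :=
  ((PySem.Str.split? (PySem.Str.replace expression " " "") "+").getD []).foldl
    (fun total addTerm =>
      total + ((PySem.Str.split? addTerm "*").getD []).foldl
        (fun product prodTerm => product * (PySem.Int.ofStr? prodTerm).getD 0) 1) 0

-- ===== PORT B =====
-- Source B's loop state: (stack, num, op); Python's string 'num' built by 'num = num + ch' is ported
-- as its list of characters (exact), so 'int(num)' is ofChars?; 'stack[-1] *= v' is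
-- 'dropLast ++ [getLastD 1 * v]' (the stack is provably nonempty there on admitted inputs).
def calcStep (st : List Int × List Char × Char) (ch : Char) : List Int × List Char × Char :=
  match st with
  | (stack, num, op) =>
    if ch = '+' ∨ ch = '*' then
      let v := (PySem.Int.ofChars? num).getD 0
      let stack' := if op = '+' then stack ++ [v] else stack.dropLast ++ [stack.getLastD 1 * v]
      (stack', [], ch)
    else (stack, num ++ [ch], op)

def calculator2_alt (expression : String) : Int :=
  ((((PySem.Str.replace expression " " "").toList ++ ['+']).foldl calcStep ([], [], '+')).1).sum

-- ===== PRECONDITION & SPEC =====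
-- Pre_ holds exactly when every substring handed to int() by A (split the space-stripped input on
-- '+', then each term on '*') parses as a Python int; on the excluded inputs Python A raises
-- ValueError (and so does B, on the identical substrings).
def Pre_calculator2 (expression : String) : Prop :=
  ((PySem.Chars.splitOn (PySem.Chars.replace expression.toList [' '] []) ['+']).all
    (fun t => (PySem.Chars.splitOn t ['*']).all
      (fun u => (PySem.Int.ofChars? u).isSome))) = true
instance (expression : String) : Decidable (Pre_calculator2 expression) := by
  unfold Pre_calculator2; infer_instance
def pvWitness_calculator2 : String := "2*3 + 4*05*1 + 7"

def Spec_calculator2 (expression : String) (out : Int) : Prop := out = calculator2_alt expression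
instance (expression : String) (out : Int) : Decidable (Spec_calculator2 expression out) := by
  unfold Spec_calculator2; infer_instance

-- ===== CLAIM (what is proved, stated in full; the proofs are below) =====
def Claim_equal_calculator2 : Prop := ∀ (expression : String), Dom_calculator2 expression → Pre_calculator2 expression → Spec_calculator2 expression (calculator2 expression)

-- ===== LEMMAS AND PROOFS =====

/-- `consHead xs l` prepends `xs` to the first piece of `l`. -/
def consHead (xs : List Char) : List (List Char) → List (List Char)
  | [] => [xs]
  | h :: t => (xs ++ h) :: t

/-- Reference single-character splitter: `split1 p cs` is Python's `cs.split(p)`. -/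
def split1 (p : Char) : List Char → List (List Char)
  | [] => [[]]
  | c :: rest => if c = p then [] :: split1 p rest else consHead [c] (split1 p rest)

theorem split1_ne_nil (p : Char) (cs : List Char) : split1 p cs ≠ [] := by
  cases cs with
  | nil => simp [split1]
  | cons c rest =>
    simp only [split1]
    split
    · simp
    · cases h : split1 p rest <;> simp [consHead]

theorem consHead_nil_of_ne (l : List (List Char)) (h : l ≠ []) : consHead [] l = l := by
  cases l with
  | nil => simp at h
  | cons a t => simp [consHead]

theorem consHead_consHead (a b : List Char) (l : List (List Char)) :
    consHead a (consHead b l) = consHead (a ++ b) l := by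
  cases l <;> simp [consHead]

theorem go_eq (p : Char) : ∀ (cs : List Char) (fuel : Nat) (cur : List Char) (acc : List (List Char)),
    cs.length < fuel →
    PySem.Chars.splitOn.go [p] fuel cs cur acc = acc.reverse ++ consHead cur.reverse (split1 p cs) := by
  intro cs
  induction cs with
  | nil =>
    intro fuel cur acc h
    cases fuel with
    | zero => omega
    | succ f => simp [PySem.Chars.splitOn.go, split1, consHead]
  | cons c rest ih =>
    intro fuel cur acc h
    cases fuel with
    | zero => simp at h
    | succ f =>
      simp only [PySem.Chars.splitOn.go]
      by_cases hc : c = p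
      · subst hc
        rw [show [c].isPrefixOf (c :: rest) = true by simp [List.isPrefixOf]]
        simp only [if_pos]
        rw [show (List.drop [c].length (c :: rest)) = rest by simp]
        rw [ih f [] (cur.reverse :: acc) (by simpa using Nat.lt_of_succ_lt_succ h)]
        simp only [split1, consHead]
        cases h' : split1 c rest with
        | nil => exact absurd h' (split1_ne_nil _ _)
        | cons a t => simp
      · rw [if_neg (by simp [List.isPrefixOf]; exact fun hh => hc hh.symm)]
        rw [ih f (c :: cur) acc (by simpa using Nat.lt_of_succ_lt_succ h)]
        simp [split1, hc, consHead_consHead]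

theorem splitOn_single (p : Char) (cs : List Char) :
    PySem.Chars.splitOn cs [p] = split1 p cs := by
  unfold PySem.Chars.splitOn
  rw [go_eq p cs (cs.length + 1) [] [] (by omega)]
  simp [consHead_nil_of_ne _ (split1_ne_nil _ _)]

/-- the value A/B take from a token: int(tok), with 0 standing in for the excluded ValueError -/
def val (u : List Char) : Int := (PySem.Int.ofChars? u).getD 0

def prodOf (t : List Char) : Int := ((split1 '*' t).map val).prod

/-- product of the first additive term, with `num` (the pending characters) prepended -/
def Hd (num cs : List Char) : Int :=
  ((consHead num (split1 '*' ((split1 '+' cs).headI))).map val).prod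

/-- sum of the products of the remaining additive terms -/
def Rs (cs : List Char) : Int := (((split1 '+' cs).tail).map prodOf).sum

theorem prod_foldl (l : List (List Char)) (a : Int) :
    l.foldl (fun p u => p * val u) a = a * (l.map val).prod := by
  induction l generalizing a with
  | nil => simp
  | cons x t ih => simp [ih, mul_assoc]

/-- A's nested folds, on the character list of the space-stripped input. -/
def Atot (cs : List Char) : Int :=
  (split1 '+' cs).foldl
    (fun total t => total + (split1 '*' t).foldl (fun p u => p * val u) 1) 0

theorem Atot_eq (cs : List Char) : Atot cs = Hd [] cs + Rs cs := by
  unfold Atot Hd Rs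
  rw [PySem.List.foldl_add (g := fun t => (split1 '*' t).foldl (fun p u => p * val u) 1)]
  cases h : split1 '+' cs with
  | nil => exact absurd h (split1_ne_nil _ _)
  | cons t0 ts =>
    simp only [List.map_cons, List.sum_cons, prod_foldl, one_mul,
      consHead_nil_of_ne _ (split1_ne_nil '*' t0), List.headI, List.tail_cons]
    rw [show (fun t => (List.map val (split1 '*' t)).prod) = prodOf from rfl]
    ring

theorem headI_consHead (xs : List Char) (l : List (List Char)) (h : l ≠ []) :
    (consHead xs l).headI = xs ++ l.headI := by
  cases l with
  | nil => simp at h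
  | cons a t => simp [consHead]

theorem tail_consHead (xs : List Char) (l : List (List Char)) (h : l ≠ []) :
    (consHead xs l).tail = l.tail := by
  cases l with
  | nil => simp at h
  | cons a t => simp [consHead]

theorem calcStep_plus (stack : List Int) (num : List Char) (ch : Char)
    (h : ch = '+' ∨ ch = '*') :
    calcStep (stack, num, '+') ch = (stack ++ [val num], [], ch) := by
  simp [calcStep, h, val]

theorem calcStep_star (stack : List Int) (num : List Char) (ch : Char)
    (h : ch = '+' ∨ ch = '*') :
    calcStep (stack, num, '*') ch
      = (stack.dropLast ++ [stack.getLastD 1 * val num], [], ch) := by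
  simp only [calcStep, if_pos h, val]
  rw [if_neg (by decide)]

theorem calcStep_other (stack : List Int) (num : List Char) (op ch : Char)
    (h1 : ch ≠ '+') (h2 : ch ≠ '*') :
    calcStep (stack, num, op) ch = (stack, num ++ [ch], op) := by
  simp [calcStep, h1, h2]

/-- The one invariant of B's scan: from state (stack, num, '+') resp. (stack, num, '*'),
    consuming `cs ++ ['+']` leaves a stack summing to the shown expression. -/
theorem main_inv (cs : List Char) : ∀ (stack : List Int) (num : List Char),
    (((cs ++ ['+']).foldl calcStep (stack, num, '+')).1.sum
        = stack.sum + Hd num cs + Rs cs)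
    ∧ (((cs ++ ['+']).foldl calcStep (stack, num, '*')).1.sum
        = stack.dropLast.sum + stack.getLastD 1 * Hd num cs + Rs cs) := by
  induction cs with
  | nil =>
    intro stack num
    constructor
    · simp only [List.nil_append, List.foldl_cons, List.foldl_nil,
        calcStep_plus stack num '+' (Or.inl rfl)]
      simp [Hd, Rs, split1, consHead, val]
    · simp only [List.nil_append, List.foldl_cons, List.foldl_nil,
        calcStep_star stack num '+' (Or.inl rfl)]
      simp [Hd, Rs, split1, consHead, val]
  | cons c rest ih =>
    intro stack num
    by_cases hp : c = '+'
    · subst hp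
      have hHd : Hd num ('+' :: rest) = val num := by
        simp [Hd, split1, consHead]
      have h1 : split1 '+' ('+' :: rest) = [] :: split1 '+' rest := by
        simp [split1]
      have hRs : Rs ('+' :: rest) = Hd [] rest + Rs rest := by
        unfold Rs Hd
        rw [h1, List.tail_cons]
        cases h : split1 '+' rest with
        | nil => exact absurd h (split1_ne_nil _ _)
        | cons t0 ts =>
          simp only [List.headI, List.tail_cons]
          rw [consHead_nil_of_ne _ (split1_ne_nil '*' t0)]
          simp only [List.map_cons, List.sum_cons]
          rfl
      constructor
      · simp only [List.cons_append, List.foldl_cons, calcStep_plus stack num '+' (Or.inl rfl)]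
        rw [(ih (stack ++ [val num]) []).1]
        simp [hHd, hRs]; ring
      · simp only [List.cons_append, List.foldl_cons, calcStep_star stack num '+' (Or.inl rfl)]
        rw [(ih (stack.dropLast ++ [stack.getLastD 1 * val num]) []).1]
        simp [hHd, hRs]; ring
    · by_cases hs : c = '*'
      · subst hs
        have hsplit : split1 '+' ('*' :: rest) = consHead ['*'] (split1 '+' rest) := by
          simp [split1]
        have hHd : ∀ nm, Hd nm ('*' :: rest) = val nm * Hd [] rest := by
          intro nm
          unfold Hd
          rw [hsplit, headI_consHead _ _ (split1_ne_nil _ _), List.singleton_append]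
          have h3 : split1 '*' ('*' :: (split1 '+' rest).headI)
              = [] :: split1 '*' ((split1 '+' rest).headI) := by
            simp [split1]
          rw [h3, show consHead nm ([] :: split1 '*' ((split1 '+' rest).headI))
              = nm :: split1 '*' ((split1 '+' rest).headI) by simp [consHead]]
          rw [consHead_nil_of_ne _ (split1_ne_nil '*' _), List.map_cons, List.prod_cons]
        have hRs : Rs ('*' :: rest) = Rs rest := by
          unfold Rs
          rw [hsplit, tail_consHead _ _ (split1_ne_nil _ _)]
        constructor
        · simp only [List.cons_append, List.foldl_cons, calcStep_plus stack num '*' (Or.inr rfl)]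
          rw [(ih (stack ++ [val num]) []).2]
          simp [hHd, hRs]
        · simp only [List.cons_append, List.foldl_cons, calcStep_star stack num '*' (Or.inr rfl)]
          rw [(ih (stack.dropLast ++ [stack.getLastD 1 * val num]) []).2]
          simp [hHd, hRs]
          ring
      · have hsplit : split1 '+' (c :: rest) = consHead [c] (split1 '+' rest) := by
          simp [split1, hp]
        have hHd : Hd num (c :: rest) = Hd (num ++ [c]) rest := by
          unfold Hd
          rw [hsplit, headI_consHead _ _ (split1_ne_nil _ _)]
          simp only [List.singleton_append, split1, if_neg hs]
          rw [consHead_consHead, ← consHead_consHead num [c]]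
        have hRs : Rs (c :: rest) = Rs rest := by
          unfold Rs
          rw [hsplit, tail_consHead _ _ (split1_ne_nil _ _)]
        constructor
        · simp only [List.cons_append, List.foldl_cons, calcStep_other stack num '+' c hp hs]
          rw [(ih stack (num ++ [c])).1, hHd, hRs]
        · simp only [List.cons_append, List.foldl_cons, calcStep_other stack num '*' c hp hs]
          rw [(ih stack (num ++ [c])).2, hHd, hRs]

/-- B's scan, from the initial state, computes A's nested-splits total. -/
theorem alt_eq_Atot (cs : List Char) :
    ((cs ++ ['+']).foldl calcStep ([], [], '+')).1.sum = Atot cs := by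
  rw [(main_inv cs [] []).1, Atot_eq]
  simp

theorem ofStr?_toList (u : String) :
    PySem.Int.ofStr? u = PySem.Int.ofChars? u.toList := by
  rw [← PySem.Int.ofStr?_ofList u.toList, String.ofList_toList]

/-- `s.split(p)` on the String side is `split1 p` on the character side. -/
theorem split?_single (s : String) (p : String) (pc : Char) (hpc : p.toList = [pc]) :
    ∃ L, PySem.Str.split? s p = some L ∧ L.map String.toList = split1 pc s.toList := by
  have h := PySem.Str.split?_map s p
  rw [hpc, PySem.Chars.split?] at h
  simp only [List.isEmpty_cons, if_false, Bool.false_eq_true] at h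
  rw [splitOn_single] at h
  cases hM : PySem.Str.split? s p with
  | none => rw [hM] at h; simp at h
  | some L =>
    rw [hM] at h
    simp only [Option.map_some, Option.some.injEq] at h
    exact ⟨L, rfl, h⟩

theorem inner_eq (t : String) :
    ((PySem.Str.split? t "*").getD []).foldl
        (fun p u => p * (PySem.Int.ofStr? u).getD 0) 1
      = (split1 '*' t.toList).foldl (fun p u => p * val u) 1 := by
  obtain ⟨M, hM, hmap⟩ := split?_single t "*" '*' rfl
  rw [hM, Option.getD_some, ← hmap, List.foldl_map]
  exact PySem.List.foldl_congr_mem _ _ _ _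
    (fun acc u _ => by rw [ofStr?_toList]; rfl)

/-- Bridge: A's port equals `Atot` of the space-stripped character list. -/
theorem portA_eq (e : String) :
    calculator2 e = Atot (PySem.Str.replace e " " "").toList := by
  unfold calculator2 Atot
  obtain ⟨L, hL, hmap⟩ := split?_single (PySem.Str.replace e " " "") "+" '+' rfl
  rw [hL, Option.getD_some, ← hmap, List.foldl_map]
  exact PySem.List.foldl_congr_mem _ _ _ _
    (fun acc t _ => by rw [inner_eq])

-- ===== VERDICT (by name: the statement is the Claim_ definition above) =====
theorem calculator2_spec : Claim_equal_calculator2 := by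
  intro e _ _
  unfold Spec_calculator2 calculator2_alt
  rw [alt_eq_Atot, portA_eq]
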